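-- pv_equiv track=rewrite | github.com/zapprosite/monorepo | scripts/hvac-rag/hvac-rag-pipe.py | evidence_level_from_hits
-- ===== SOURCE A (Python) =====
-- def evidence_level_from_hits(hits: list, snapshot: dict, partial_context: str = "") -> str:
--     """Classify the best evidence level available for this answer."""
--     if not hits:
--         return "Graph interno" if partial_context else "Graph interno"
--
--     exact_models = {
--         str(snapshot.get("outdoor_model") or "").upper(),
--         str(snapshot.get("indoor_model") or "").upper(),
--     }
--     exact_models.discard("")
--
--     for hit in hits:
--         payload = hit.get("payload", {})
--         candidates = [str(m).upper() for m in payload.get("model_candidates", [])]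
--         if exact_models and any(model in candidates for model in exact_models):
--             return "Manual exato"
--
--     return "Manual da família"
-- ===== SOURCE B (Python) =====
-- def evidence_level_from_hits(hits: list, snapshot: dict, partial_context: str = "") -> str:
--     """Classify the best evidence level available for this answer."""
--     if not hits:
--         return "Graph interno"
--
--     # Sort both sides (exact models and every candidate seen, deduplicated,
--     # uppercased, "" dropped) and detect a common element by a two-pointer merge.
--     exact = sorted({str(snapshot.get("outdoor_model") or "").upper(),
--                     str(snapshot.get("indoor_model") or "").upper()} - {""})
--     cands = sorted({str(m).upper()
--                     for hit in hits
--                     for m in hit.get("payload", {}).get("model_candidates", [])})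
--     i = j = 0
--     while i < len(exact) and j < len(cands):
--         if exact[i] == cands[j]:
--             return "Manual exato"
--         if exact[i] < cands[j]:
--             i += 1
--         else:
--             j += 1
--     return "Manual da família"
-- ===== Notes on version B (the rewrite author's own statement) =====
-- stated objective: alternative
-- what changed: B replaces A's hit-by-hit loop with an inner any()/membership scan and early return by a sort-and-merge intersection: it sorts the exact-model set and the deduplicated set of all uppercased candidates and detects a common element with a two-pointer merge.
import Mathlib
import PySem

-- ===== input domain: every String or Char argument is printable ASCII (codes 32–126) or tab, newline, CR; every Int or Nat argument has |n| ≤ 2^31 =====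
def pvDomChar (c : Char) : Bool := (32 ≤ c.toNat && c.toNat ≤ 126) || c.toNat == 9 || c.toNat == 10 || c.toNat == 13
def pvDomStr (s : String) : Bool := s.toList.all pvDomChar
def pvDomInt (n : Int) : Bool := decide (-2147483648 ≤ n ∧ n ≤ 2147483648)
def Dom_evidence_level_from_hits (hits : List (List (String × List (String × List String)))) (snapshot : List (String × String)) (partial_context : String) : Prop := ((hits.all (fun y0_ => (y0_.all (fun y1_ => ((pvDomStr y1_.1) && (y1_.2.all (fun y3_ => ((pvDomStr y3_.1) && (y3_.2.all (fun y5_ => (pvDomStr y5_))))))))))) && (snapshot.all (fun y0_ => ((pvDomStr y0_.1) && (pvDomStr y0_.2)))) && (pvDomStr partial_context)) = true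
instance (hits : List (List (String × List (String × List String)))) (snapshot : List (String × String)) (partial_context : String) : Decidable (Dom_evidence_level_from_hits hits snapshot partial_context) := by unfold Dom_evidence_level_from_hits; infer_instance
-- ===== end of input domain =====

-- B replaces A's per-hit scan + early return by sorting both the exact-model set and the global candidate set and running a two-pointer merge to detect a common element (objective: alternative).


-- ===== PORT A =====
-- exact_models = {upper(snapshot.get("outdoor_model") or ""), upper(snapshot.get("indoor_model") or "")} minus ""
-- (snapshot.get(k) or "" : a missing key gives None→"", an empty value stays ""; both are getD with "" here)
def pvExactModels (snapshot : List (String × String)) : PySem.Set String :=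
  PySem.Set.discard
    (PySem.Set.add
      (PySem.Set.add PySem.Set.empty
        (PySem.Str.upper ((PySem.Dict.mk snapshot).getD "outdoor_model" "")))
      (PySem.Str.upper ((PySem.Dict.mk snapshot).getD "indoor_model" "")))
    ""

-- candidates = [str(m).upper() for m in hit.get("payload", {}).get("model_candidates", [])]
def pvCands (hit : List (String × List (String × List String))) : List String :=
  ((PySem.Dict.mk ((PySem.Dict.mk hit).getD "payload" [])).getD "model_candidates" []).map PySem.Str.upper

-- A's for-loop with early return "Manual exato"
def pvLoopA (exact : PySem.Set String) : List (List (String × List (String × List String))) → String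
  | [] => "Manual da família"
  | hit :: rest =>
      let candidates := pvCands hit
      if !exact.isEmpty && exact.any (fun model => candidates.contains model) then "Manual exato"
      else pvLoopA exact rest

def evidence_level_from_hits (hits : List (List (String × List (String × List String)))) (snapshot : List (String × String)) (partial_context : String) : String :=
  if hits.isEmpty then (if partial_context ≠ "" then "Graph interno" else "Graph interno")
  else pvLoopA (pvExactModels snapshot) hits

-- ===== PORT B =====
-- two-pointer merge over two sorted lists: is there a common element?
def pvMerge : List String → List String → Bool
  | [], _ => false
  | _ :: _, [] => false
  | a :: as, b :: bs =>
      if a = b then true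
      else if a < b then pvMerge as (b :: bs)
      else pvMerge (a :: as) bs
termination_by as bs => as.length + bs.length

def evidence_level_from_hits_alt (hits : List (List (String × List (String × List String)))) (snapshot : List (String × String)) (partial_context : String) : String :=
  if hits.isEmpty then "Graph interno"
  else
    let exact := PySem.List.sorted (pvExactModels snapshot) (fun x => x) false
    let cands := PySem.List.sorted (PySem.Set.ofList (hits.flatMap pvCands)) (fun x => x) false
    if pvMerge exact cands then "Manual exato"
    else "Manual da família"

-- ===== PRECONDITION & SPEC =====
def Spec_evidence_level_from_hits (hits : List (List (String × List (String × List String)))) (snapshot : List (String × String)) (partial_context : String) (out : String) : Prop := out = evidence_level_from_hits_alt hits snapshot partial_context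
instance (hits : List (List (String × List (String × List String)))) (snapshot : List (String × String)) (partial_context : String) (out : String) : Decidable (Spec_evidence_level_from_hits hits snapshot partial_context out) := by unfold Spec_evidence_level_from_hits; infer_instance

-- ===== CLAIM (what is proved, stated in full; the proofs are below) =====
def Claim_equal_evidence_level_from_hits : Prop := ∀ (hits : List (List (String × List (String × List String)))) (snapshot : List (String × String)) (partial_context : String), Dom_evidence_level_from_hits hits snapshot partial_context → Spec_evidence_level_from_hits hits snapshot partial_context (evidence_level_from_hits hits snapshot partial_context)

-- ===== LEMMAS AND PROOFS =====
-- A's early-return loop equals "does any exact model occur among all candidates?"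
theorem pvLoopA_eq (exact : PySem.Set String) (hits : List (List (String × List (String × List String)))) :
    pvLoopA exact hits =
      if exact.any (fun m => (hits.flatMap pvCands).contains m) then "Manual exato"
      else "Manual da família" := by
  induction hits with
  | nil => simp [pvLoopA]
  | cons hit rest ih =>
      simp only [pvLoopA, List.flatMap_cons, ih]
      have hsplit : (exact.any fun m => (pvCands hit ++ rest.flatMap pvCands).contains m)
          = ((exact.any fun m => (pvCands hit).contains m)
             || (exact.any fun m => (rest.flatMap pvCands).contains m)) := by
        apply Bool.eq_iff_iff.mpr
        simp only [List.any_eq_true, List.contains_eq_mem, List.mem_append, decide_eq_true_eq,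
          Bool.or_eq_true]
        exact ⟨fun ⟨x, hx, h⟩ => h.elim (fun h => Or.inl ⟨x, hx, h⟩) (fun h => Or.inr ⟨x, hx, h⟩),
          fun h => h.elim (fun ⟨x, hx, h⟩ => ⟨x, hx, Or.inl h⟩) (fun ⟨x, hx, h⟩ => ⟨x, hx, Or.inr h⟩)⟩
      rw [hsplit]
      cases hA : exact.any (fun m => (pvCands hit).contains m)
      · simp
      · have hne : exact.isEmpty = false := by
          rcases List.any_eq_true.mp hA with ⟨m, hm, _⟩
          simp only [List.isEmpty_eq_false_iff, ne_eq]
          exact List.ne_nil_of_mem hm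
        simp [hne]

-- The two-pointer merge on strictly sorted lists detects exactly a common element.
theorem pvMerge_iff (as bs : List String) :
    as.Pairwise (· < ·) → bs.Pairwise (· < ·) →
      (pvMerge as bs = true ↔ ∃ x, x ∈ as ∧ x ∈ bs) := by
  induction as, bs using pvMerge.induct with
  | case1 bs => intro _ _; simp [pvMerge]
  | case2 a as => intro _ _; simp [pvMerge]
  | case3 as b bs =>
      intro _ _
      constructor
      · intro _; exact ⟨b, List.mem_cons_self, List.mem_cons_self⟩
      · intro _; simp [pvMerge]
  | case4 a as b bs hne hlt ih =>
      intro ha hb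
      have hblt : ∀ y ∈ bs, b < y := (List.pairwise_cons.mp hb).1
      simp only [pvMerge, if_neg hne, if_pos hlt]
      rw [ih (List.pairwise_cons.mp ha).2 hb]
      constructor
      · rintro ⟨x, hx1, hx2⟩; exact ⟨x, List.mem_cons_of_mem _ hx1, hx2⟩
      · rintro ⟨x, hx1, hx2⟩
        rcases List.mem_cons.mp hx1 with rfl | hx1
        · rcases List.mem_cons.mp hx2 with rfl | hx2
          · exact absurd rfl hne
          · exact absurd hlt (not_lt.mpr (le_of_lt (hblt _ hx2)))
        · exact ⟨x, hx1, hx2⟩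
  | case5 a as b bs hne hnlt ih =>
      intro ha hb
      have hba : b < a := lt_of_le_of_ne (not_lt.mp hnlt) (fun h => hne h.symm)
      have halt : ∀ y ∈ as, a < y := (List.pairwise_cons.mp ha).1
      simp only [pvMerge, if_neg hne, if_neg hnlt]
      rw [ih ha (List.pairwise_cons.mp hb).2]
      constructor
      · rintro ⟨x, hx1, hx2⟩; exact ⟨x, hx1, List.mem_cons_of_mem _ hx2⟩
      · rintro ⟨x, hx1, hx2⟩
        rcases List.mem_cons.mp hx2 with rfl | hx2
        · rcases List.mem_cons.mp hx1 with rfl | hx1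
          · exact absurd rfl hne
          · exact absurd hba (not_lt.mpr (le_of_lt (halt _ hx1)))
        · exact ⟨x, hx1, hx2⟩

-- pvExactModels is a Nodup list (it is a PySem.Set)
theorem pvExactModels_nodup (snapshot : List (String × String)) : (pvExactModels snapshot).Nodup := by
  unfold pvExactModels
  exact PySem.Set.nodup_discard _ _ (PySem.Set.nodup_add _ _ (PySem.Set.nodup_add _ _ List.nodup_nil))

-- sorted of a Nodup list of strings is strictly increasing
theorem sorted_nodup_pairwise_lt (l : List String) (h : l.Nodup) :
    (PySem.List.sorted l (fun x => x) false).Pairwise (· < ·) := by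
  have h1 : (PySem.List.sorted l (fun x => x) false).Pairwise (· ≤ ·) :=
    PySem.List.sorted_pairwise l (fun x => x)
  have h2 : (PySem.List.sorted l (fun x => x) false).Nodup :=
    (PySem.List.sorted_perm l (fun x => x) false).nodup_iff.mpr h
  exact (h1.and h2).imp (fun ⟨hle, hne⟩ => lt_of_le_of_ne hle hne)

-- ===== VERDICT (by name: the statement is the Claim_ definition above) =====
theorem evidence_level_from_hits_spec : Claim_equal_evidence_level_from_hits := by
  intro hits snapshot partial_context _
  unfold Spec_evidence_level_from_hits evidence_level_from_hits evidence_level_from_hits_alt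
  by_cases h : hits.isEmpty
  · simp [h]
  · simp only [h, if_false, Bool.false_eq_true]
    rw [pvLoopA_eq]
    have hmerge : pvMerge (PySem.List.sorted (pvExactModels snapshot) (fun x => x) false)
        (PySem.List.sorted (PySem.Set.ofList (hits.flatMap pvCands)) (fun x => x) false)
        = (pvExactModels snapshot).any (fun m => (hits.flatMap pvCands).contains m) := by
      apply Bool.eq_iff_iff.mpr
      rw [pvMerge_iff _ _ (sorted_nodup_pairwise_lt _ (pvExactModels_nodup snapshot))
        (PySem.List.sorted_ofList_pairwise_lt _)]
      simp only [PySem.List.mem_sorted, PySem.Set.mem_ofList, List.any_eq_true,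
        List.contains_eq_mem, decide_eq_true_eq]
    rw [hmerge]
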